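-- pv_equiv track=rewrite | github.com/Hlax/KMBL_V1 | services/orchestrator/src/kmbl_orchestrator/identity/profile.py | _match_keywords_weighted
-- ===== SOURCE A (Python) =====
-- def _match_keywords_weighted(
--     text: str, vocab: dict[str, set[str]], max_matches: int = 4,
-- ) -> list[tuple[str, int]]:
--     """Match text against a keyword vocabulary, return (label, hit_count) pairs."""
--     lower = text.lower()
--     scored: list[tuple[str, int]] = []
--     for label, keywords in vocab.items():
--         hits = sum(1 for kw in keywords if kw in lower)
--         if hits > 0:
--             scored.append((label, hits))
--     scored.sort(key=lambda x: x[1], reverse=True)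
--     return scored[:max_matches]
-- ===== SOURCE B (Python) =====
-- def _match_keywords_weighted(
--     text: str, vocab: dict[str, set[str]], max_matches: int = 4,
-- ) -> list[tuple[str, int]]:
--     """Match text against a keyword vocabulary, return (label, hit_count) pairs."""
--     lower = text.lower()
--     # one flattened pass: increment a per-label counter for every matching keyword
--     counts: dict[str, int] = {}
--     for label, keywords in vocab.items():
--         for kw in keywords:
--             if kw in lower:
--                 counts[label] = counts.get(label, 0) + 1
--     if not counts:
--         return []
--     # counting (bucket) sort by hit count, descending; stable because buckets
--     # keep first-hit (= vocab) order
--     top = max(counts.values())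
--     buckets: list[list[tuple[str, int]]] = [[] for _ in range(top + 1)]
--     for label, hits in counts.items():
--         buckets[hits].append((label, hits))
--     out: list[tuple[str, int]] = []
--     for hits in range(top, 0, -1):
--         out += buckets[hits]
--     return out[:max_matches]
-- ===== Notes on version B (the rewrite author's own statement) =====
-- stated objective: alternative
-- what changed: B inverts the scoring into a single flattened pass that increments a per-label counter for each matching keyword (instead of A's per-label sum + conditional append), and replaces A's comparison sort entirely by a counting/bucket sort: labels are dropped into buckets indexed by hit count and emitted from the highest bucket down, which reproduces the stable descending order.
import Mathlib
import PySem

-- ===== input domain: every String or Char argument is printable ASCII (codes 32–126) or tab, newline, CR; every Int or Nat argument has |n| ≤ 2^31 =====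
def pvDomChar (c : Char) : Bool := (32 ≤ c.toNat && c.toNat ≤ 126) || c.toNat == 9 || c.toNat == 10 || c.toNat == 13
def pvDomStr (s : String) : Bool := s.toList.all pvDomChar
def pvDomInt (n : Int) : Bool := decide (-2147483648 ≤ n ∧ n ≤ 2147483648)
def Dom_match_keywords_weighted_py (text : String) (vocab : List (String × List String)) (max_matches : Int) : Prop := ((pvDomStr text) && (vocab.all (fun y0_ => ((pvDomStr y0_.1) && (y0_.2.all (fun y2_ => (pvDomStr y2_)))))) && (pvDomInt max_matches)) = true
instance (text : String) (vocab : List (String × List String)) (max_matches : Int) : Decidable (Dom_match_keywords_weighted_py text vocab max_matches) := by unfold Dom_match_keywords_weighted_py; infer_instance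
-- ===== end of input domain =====

-- B inverts A's scoring into one flattened counter-increment pass and replaces the comparison
-- sort by a counting/bucket sort emitted from the highest bucket down (objective: alternative).


-- ===== PORT A =====
def match_keywords_weighted_py (text : String) (vocab : List (String × List String)) (max_matches : Int) : List (String × Int) :=
  let lower := PySem.Str.lower text
  let scored := (PySem.Dict.ofList vocab).items.foldl
    (fun acc p =>
      let hits : Int := p.2.foldl (fun s kw => if PySem.Str.isIn kw lower then s + 1 else s) 0
      if hits > 0 then acc ++ [(p.1, hits)] else acc) []
  PySem.List.slice (PySem.List.sorted scored (fun x => x.2) true) none (some max_matches)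

-- ===== PORT B =====
def match_keywords_weighted_py_alt (text : String) (vocab : List (String × List String)) (max_matches : Int) : List (String × Int) :=
  let lower := PySem.Str.lower text
  -- counts[label] = counts.get(label, 0) + 1 for every matching keyword, one flattened pass
  let counts := (PySem.Dict.ofList vocab).items.foldl
    (fun (c : PySem.Dict String Int) p =>
      p.2.foldl (fun c kw =>
        if PySem.Str.isIn kw lower then c.insert p.1 (c.getD p.1 0 + 1) else c) c)
    PySem.Dict.empty
  if counts.items.isEmpty then []
  else
    -- top = max(counts.values()); counts is nonempty here, so the .getD 0 default is never used
    let top : Int := (PySem.List.max? counts.values (fun v => v)).getD 0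
    let buckets : List (List (String × Int)) := List.replicate (top + 1).toNat []
    -- buckets[hits].append((label, hits)); hits is always in range 1..top
    let buckets := counts.items.foldl
      (fun bs p => bs.set p.2.toNat (bs.getD p.2.toNat [] ++ [p])) buckets
    let out := (PySem.List.pyRange top 0 (-1)).foldl
      (fun out h => out ++ buckets.getD h.toNat []) []
    PySem.List.slice out none (some max_matches)

-- ===== PRECONDITION & SPEC =====
def Spec_match_keywords_weighted_py (text : String) (vocab : List (String × List String)) (max_matches : Int) (out : List (String × Int)) : Prop := out = match_keywords_weighted_py_alt text vocab max_matches
instance (text : String) (vocab : List (String × List String)) (max_matches : Int) (out : List (String × Int)) : Decidable (Spec_match_keywords_weighted_py text vocab max_matches out) := by unfold Spec_match_keywords_weighted_py; infer_instance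

-- ===== CLAIM =====
def Claim_equal_match_keywords_weighted_py : Prop := ∀ (text : String) (vocab : List (String × List String)) (max_matches : Int), Dom_match_keywords_weighted_py text vocab max_matches → Spec_match_keywords_weighted_py text vocab max_matches (match_keywords_weighted_py text vocab max_matches)

-- ===== LEMMAS AND PROOFS =====

-- ---- part 1: the counter dict's items are exactly A's scored list ----

-- B's inner keyword loop over one label, as a function of the test
def pvInner (test : String → Bool) (label : String) (kws : List String)
    (c : PySem.Dict String Int) : PySem.Dict String Int :=
  kws.foldl (fun c kw => if test kw then c.insert label (c.getD label 0 + 1) else c) c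

-- repeated 'c[label] = c.get(label,0) + 1'
def pvBump (label : String) (c : PySem.Dict String Int) : PySem.Dict String Int :=
  c.insert label (c.getD label 0 + 1)

lemma pvBump_iterate (label : String) (n : Nat) (c : PySem.Dict String Int) (v : Int) :
    (pvBump label)^[n] (c.insert label v) = c.insert label (v + n) := by
  induction n generalizing v with
  | zero => simp
  | succ n ih =>
    rw [Function.iterate_succ_apply]
    show (pvBump label)^[n] ((c.insert label v).insert label
      ((c.insert label v).getD label 0 + 1)) = _
    rw [PySem.Dict.getD_insert_self, PySem.Dict.insert_insert_self, ih]
    congr 1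
    push_cast
    ring

lemma pvFoldl_const {α β : Type} (g : β → β) (l : List α) (c : β) :
    l.foldl (fun c _ => g c) c = g^[l.length] c := by
  induction l generalizing c with
  | nil => simp
  | cons x t ih => simp [ih, Function.iterate_succ_apply]

lemma pvInner_items (test : String → Bool) (label : String) (kws : List String)
    (c : PySem.Dict String Int) (hc : c.contains label = false) :
    (pvInner test label kws c).items
      = c.items ++ (if 0 < kws.countP test then [(label, (kws.countP test : Int))] else []) := by
  unfold pvInner
  rw [PySem.List.foldl_if_eq_foldl_filter]
  have hrep : (kws.filter test).foldl
      (fun c (_ : String) => c.insert label (c.getD label 0 + 1)) c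
      = (pvBump label)^[(kws.filter test).length] c := by
    exact pvFoldl_const (pvBump label) (kws.filter test) c
  rw [hrep, ← List.countP_eq_length_filter]
  rcases Nat.eq_zero_or_pos (kws.countP test) with h0 | hpos
  · simp [h0]
  · obtain ⟨m, hm⟩ : ∃ m, kws.countP test = m + 1 := ⟨kws.countP test - 1, by omega⟩
    rw [hm]
    rw [Function.iterate_succ_apply]
    have h1 : pvBump label c = c.insert label 1 := by
      unfold pvBump
      rw [PySem.Dict.getD_of_not_contains c 0 hc]
      norm_num
    rw [h1, pvBump_iterate label m c 1,
        PySem.Dict.items_insert_of_not_contains c _ hc]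
    simp
    omega

lemma pvInner_keys (test : String → Bool) (label : String) (kws : List String)
    (c : PySem.Dict String Int) (hc : c.contains label = false) :
    (pvInner test label kws c).keys
      = c.keys ++ (if 0 < kws.countP test then [label] else []) := by
  have h := pvInner_items test label kws c hc
  show (pvInner test label kws c).items.map Prod.fst = _
  rw [h]
  split_ifs <;> simp [PySem.Dict.keys]

-- A's scored list for a given test
def pvScored (test : String → Bool) (items : List (String × List String)) : List (String × Int) :=
  (items.filter (fun p => decide ((0 : Int) < (p.2.countP test : Nat)))).map
    (fun p => (p.1, ((p.2.countP test : Nat) : Int)))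

lemma pvOuter_items (test : String → Bool) (its : List (String × List String))
    (c : PySem.Dict String Int)
    (hnd : (its.map Prod.fst).Nodup)
    (hfresh : ∀ p ∈ its, c.contains p.1 = false) :
    (its.foldl (fun c p => pvInner test p.1 p.2 c) c).items
      = c.items ++ pvScored test its := by
  induction its generalizing c with
  | nil => simp [pvScored]
  | cons p t ih =>
    simp only [List.foldl_cons]
    have hcp : c.contains p.1 = false := hfresh p (List.mem_cons_self)
    have hkeys := pvInner_keys test p.1 p.2 c hcp
    have hfresh' : ∀ q ∈ t, (pvInner test p.1 p.2 c).contains q.1 = false := by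
      intro q hq
      rw [PySem.Dict.contains_eq_decide_mem_keys, hkeys]
      have hq1 : q.1 ∉ c.keys := by
        have := hfresh q (List.mem_cons_of_mem _ hq)
        rw [PySem.Dict.contains_eq_decide_mem_keys] at this
        simpa using this
      have hqp : q.1 ≠ p.1 := by
        simp only [List.map_cons, List.nodup_cons] at hnd
        intro he
        exact hnd.1 (he ▸ List.mem_map_of_mem hq)
      split_ifs <;> simp_all
    rw [ih _ (by simp only [List.map_cons, List.nodup_cons] at hnd; exact hnd.2) hfresh',
        pvInner_items test p.1 p.2 c hcp]
    simp only [pvScored, List.filter_cons]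
    by_cases hpos : 0 < p.2.countP test
    · simp [hpos]
    · simp [hpos]

-- ---- part 2: bucket emission equals the stable reverse sort ----

-- insertion skips a block of equal-or-larger keys
lemma pvInsertBy_append (before : (String × Int) → (String × Int) → Bool)
    (x : String × Int) (B r : List (String × Int))
    (hB : ∀ y ∈ B, before x y = false) :
    PySem.List.insertBy before x (B ++ r) = B ++ PySem.List.insertBy before x r := by
  induction B with
  | nil => simp
  | cons y t ih =>
    have hy : before x y = false := hB y List.mem_cons_self
    simp only [List.cons_append, PySem.List.insertBy, hy]
    simp [ih (fun z hz => hB z (List.mem_cons_of_mem _ hz))]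

lemma pvInsertBy_all_before (before : (String × Int) → (String × Int) → Bool)
    (x : String × Int) (r : List (String × Int))
    (hr : ∀ y ∈ r, before x y = true) :
    PySem.List.insertBy before x r = x :: r := by
  cases r with
  | nil => rfl
  | cons y t => simp [PySem.List.insertBy, hr y List.mem_cons_self]

-- blocks of equal hit counts, highest first
def pvBlocks (xs : List (String × Int)) (hs : List Int) : List (String × Int) :=
  hs.flatMap (fun h => xs.filter (fun p => p.2 = h))

lemma pvBlocks_insert (hs : List Int) (xs : List (String × Int)) (x : String × Int)
    (hdec : hs.Pairwise (fun a b => b < a)) (hk : x.2 ∈ hs) :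
    PySem.List.insertBy (fun a b => decide (b.2 < a.2)) x (pvBlocks xs hs)
      = pvBlocks (xs ++ [x]) hs := by
  induction hs with
  | nil => cases hk
  | cons h t ih =>
    have hdt : t.Pairwise (fun a b => b < a) := hdec.sublist (List.sublist_cons_self h t)
    have hlt : ∀ h' ∈ t, h' < h := fun h' hh' => (List.pairwise_cons.mp hdec).1 h' hh'
    simp only [pvBlocks, List.flatMap_cons]
    by_cases hx : x.2 = h
    · have hskip : ∀ y ∈ xs.filter (fun p => p.2 = h),
          (decide (y.2 < x.2) : Bool) = false := by
        intro y hy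
        have : y.2 = h := by simpa using (List.mem_filter.mp hy).2
        simp [this, hx]
      rw [pvInsertBy_append _ _ _ _ hskip]
      have hall : ∀ y ∈ pvBlocks xs t, (decide (y.2 < x.2) : Bool) = true := by
        intro y hy
        obtain ⟨h', hh', hyf⟩ := List.mem_flatMap.mp hy
        have : y.2 = h' := by simpa using (List.mem_filter.mp hyf).2
        have := hlt h' hh'
        simp_all
      rw [pvInsertBy_all_before _ _ _ hall]
      have htail : pvBlocks (xs ++ [x]) t = pvBlocks xs t := by
        unfold pvBlocks
        apply List.flatMap_congr
        intro h' hh'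
        have hne : x.2 ≠ h' := by have := hlt h' hh'; omega
        simp [List.filter_append, hne]
      simp only [pvBlocks] at htail
      rw [htail]
      simp [List.filter_append, hx]
    · have hkt : x.2 ∈ t := by
        rcases List.mem_cons.mp hk with he | ht
        · exact absurd he hx
        · exact ht
      have hxlt : x.2 < h := hlt _ hkt
      have hskip : ∀ y ∈ xs.filter (fun p => p.2 = h),
          (decide (y.2 < x.2) : Bool) = false := by
        intro y hy
        have : y.2 = h := by simpa using (List.mem_filter.mp hy).2
        simp [this]
        omega
      rw [pvInsertBy_append _ _ _ _ hskip]
      have hih := ih hdt hkt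
      simp only [pvBlocks] at hih
      rw [hih]
      simp [List.filter_append, hx]

lemma pvSorted_eq_blocks (xs : List (String × Int)) (hs : List Int)
    (hdec : hs.Pairwise (fun a b => b < a)) (hmem : ∀ p ∈ xs, p.2 ∈ hs) :
    PySem.List.sorted xs (fun p => p.2) true = pvBlocks xs hs := by
  induction xs using List.reverseRecOn with
  | nil => simp [pvBlocks, PySem.List.sorted]
  | append_singleton xs x ih =>
    rw [PySem.List.sorted_rev_eq_foldl_insertBy, List.foldl_append]
    rw [← PySem.List.sorted_rev_eq_foldl_insertBy]
    simp only [List.foldl_cons, List.foldl_nil]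
    rw [ih (fun p hp => hmem p (List.mem_append_left _ hp))]
    exact pvBlocks_insert hs xs x hdec (hmem x (List.mem_append_right _ List.mem_cons_self))

lemma pvRange_desc (top : Int) :
    (PySem.List.pyRange top 0 (-1)).Pairwise (fun a b => b < a) := by
  rw [PySem.List.pyRange_neg_one]
  apply List.Pairwise.map
  · intro a b hab
    exact hab
  · -- (List.range n).Pairwise fun i j => top - j < top - i
    exact (List.pairwise_lt_range).imp (by intro i j hij; omega)

-- bucket filling: final content of each bucket
lemma pvBucketFold (l : List (String × Int)) (bs : List (List (String × Int)))
    (hlen : ∀ p ∈ l, p.2.toNat < bs.length) (i : Nat) :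
    ((l.foldl (fun bs p => bs.set p.2.toNat (bs.getD p.2.toNat [] ++ [p])) bs).getD i [])
      = bs.getD i [] ++ l.filter (fun p => p.2.toNat = i) := by
  induction l generalizing bs with
  | nil => simp
  | cons p t ih =>
    simp only [List.foldl_cons, List.filter_cons]
    have hp := hlen p List.mem_cons_self
    rw [ih _ (fun q hq => by rw [List.length_set]; exact hlen q (List.mem_cons_of_mem _ hq))]
    by_cases hpi : p.2.toNat = i
    · subst hpi
      rw [List.getD_eq_getElem?_getD, List.getElem?_set_self (by exact hp)]
      simp [List.getD_eq_getElem?_getD]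
    · rw [List.getD_eq_getElem?_getD, List.getElem?_set_ne (by omega)]
      simp [List.getD_eq_getElem?_getD, hpi]

lemma pvSlice_nil (m : Int) :
    PySem.List.slice ([] : List (String × Int)) none (some m) = [] := by
  simp [PySem.List.slice]

lemma pvReplicate_getD (n i : Nat) :
    (List.replicate n ([] : List (String × Int))).getD i [] = [] := by
  simp [List.getD_eq_getElem?_getD, List.getElem?_replicate]
  split <;> rfl

-- ===== VERDICT =====
theorem match_keywords_weighted_py_spec : Claim_equal_match_keywords_weighted_py := by
  intro text vocab max_matches _
  unfold Spec_match_keywords_weighted_py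
  unfold match_keywords_weighted_py match_keywords_weighted_py_alt
  simp only []
  set lower := PySem.Str.lower text with hlower
  set items := (PySem.Dict.ofList vocab).items with hitems
  set test : String → Bool := fun kw => PySem.Str.isIn kw lower with htest
  -- A's scored list
  have hA : items.foldl (fun acc p =>
        let hits : Int := p.2.foldl (fun s kw => if PySem.Str.isIn kw lower then s + 1 else s) 0
        if hits > 0 then acc ++ [(p.1, hits)] else acc) []
      = pvScored test items := by
    have hbody : ∀ (acc : List (String × Int)) (p : String × List String),
        (let hits : Int := p.2.foldl (fun s kw => if PySem.Str.isIn kw lower then s + 1 else s) 0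
         if hits > 0 then acc ++ [(p.1, hits)] else acc)
        = (if (0 : Int) < (p.2.countP test : Nat) then acc ++ [(p.1, ((p.2.countP test : Nat) : Int))] else acc) := by
      intro acc p
      have hcnt : p.2.foldl (fun s kw => if PySem.Str.isIn kw lower then s + 1 else s) (0 : Int)
          = (0 : Int) + (p.2.countP test : Nat) := PySem.List.foldl_if_add_one test p.2 0
      simp only [hcnt, zero_add, gt_iff_lt]
    calc items.foldl (fun acc p =>
          let hits : Int := p.2.foldl (fun s kw => if PySem.Str.isIn kw lower then s + 1 else s) 0
          if hits > 0 then acc ++ [(p.1, hits)] else acc) []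
        = items.foldl (fun acc p =>
            if (0 : Int) < (p.2.countP test : Nat) then acc ++ [(p.1, ((p.2.countP test : Nat) : Int))] else acc) [] := by
          exact PySem.List.foldl_congr_mem _ _ _ _ (fun acc p _ => hbody acc p)
      _ = pvScored test items := by
          rw [PySem.List.foldl_append_ite (fun p => (0 : Int) < ((p.2.countP test : Nat) : Int))
              (fun p => (p.1, ((p.2.countP test : Nat) : Int))) items []]
          simp [pvScored]
  rw [hA]
  -- B's counter dict
  have hc : ((PySem.Dict.ofList vocab).items.foldl
      (fun (c : PySem.Dict String Int) p =>
        p.2.foldl (fun c kw =>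
          if PySem.Str.isIn kw lower then c.insert p.1 (c.getD p.1 0 + 1) else c) c)
      PySem.Dict.empty).items = pvScored test items := by
    have hnd : (items.map Prod.fst).Nodup := by
      have := PySem.Dict.nodup_keys_ofList (κ := String) (ν := List String) vocab
      simpa [PySem.Dict.keys, hitems] using this
    exact pvOuter_items test items PySem.Dict.empty hnd
      (fun p _ => PySem.Dict.contains_empty p.1)
  rw [← hitems] at hc
  by_cases hni : pvScored test items = []
  · simp only [hc, hni]
    rw [show PySem.List.sorted ([] : List (String × Int)) (fun x => x.2) true = [] from rfl,
        pvSlice_nil]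
    simp
  · -- nonempty branch
    set S := pvScored test items with hS
    have hpos : ∀ r ∈ S, 0 < r.2 := by
      intro r hr
      obtain ⟨p, hp, rfl⟩ := List.mem_map.mp hr
      have := (List.mem_filter.mp hp).2
      simpa using this
    obtain ⟨m, hm⟩ : ∃ m, PySem.List.max? (S.map (fun r => r.2)) (fun v => v) = some m := by
      rcases h : PySem.List.max? (S.map (fun r => r.2)) (fun v => v) with _ | m
      · rw [PySem.List.max?_eq_none_iff] at h
        exact absurd (List.map_eq_nil_iff.mp h) hni
      · exact ⟨m, h⟩
    have hmmem : m ∈ S.map (fun r => r.2) := PySem.List.max?_mem hm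
    have hm1 : 1 ≤ m := by
      obtain ⟨r, hr, hrm⟩ := List.mem_map.mp hmmem
      have := hpos r hr
      omega
    have hle : ∀ r ∈ S, r.2 ≤ m := by
      intro r hr
      exact PySem.List.max?_isMax hm r.2 (List.mem_map_of_mem hr)
    -- reduce B's branch
    simp only [hc, List.isEmpty_iff, hni, if_false, PySem.Dict.values, hm, Option.getD_some]
    -- buckets content
    have hbound : ∀ p ∈ S, p.2.toNat < (List.replicate (m + 1).toNat
        ([] : List (String × Int))).length := by
      intro p hp
      have h1 := hpos p hp
      have h2 := hle p hp
      rw [List.length_replicate]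
      omega
    have hfill := fun i => pvBucketFold S (List.replicate (m + 1).toNat []) hbound i
    -- the emission loop
    have hfold := PySem.List.foldl_append_eq_flatMap
      (fun (h : Int) =>
        (List.foldl (fun (bs : List (List (String × Int))) p =>
            bs.set p.2.toNat (bs.getD p.2.toNat [] ++ [p]))
          (List.replicate (m + 1).toNat []) S).getD h.toNat [])
      (PySem.List.pyRange m 0 (-1)) []
    rw [hfold]
    have hout : (PySem.List.pyRange m 0 (-1)).flatMap (fun (h : Int) =>
        (List.foldl (fun (bs : List (List (String × Int))) p =>
            bs.set p.2.toNat (bs.getD p.2.toNat [] ++ [p]))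
          (List.replicate (m + 1).toNat []) S).getD h.toNat [])
        = pvBlocks S (PySem.List.pyRange m 0 (-1)) := by
      unfold pvBlocks
      apply List.flatMap_congr
      intro h hh
      rw [hfill h.toNat, pvReplicate_getD]
      simp only [List.nil_append]
      apply List.filter_congr
      intro p hp
      have h1 := hpos p hp
      have h2 := (PySem.List.mem_pyRange_neg_one.mp hh).1
      simp only [decide_eq_decide]
      omega
    rw [hout]
    -- A's sort
    rw [pvSorted_eq_blocks S (PySem.List.pyRange m 0 (-1)) (pvRange_desc m)
      (fun p hp => PySem.List.mem_pyRange_neg_one.mpr ⟨hpos p hp, hle p hp⟩)]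
    simp
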